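-- pv_equiv track=rewrite | github.com/laagom/Algorithm | 프로그래머스/unrated/181887. 홀수 vs 짝수/홀수 vs 짝수.py | solution
-- ===== SOURCE A (Python) =====
-- def solution(num_list):
--     sum_odd = 0
--     sum_oven = 0
--
--     for i, num in enumerate(num_list):
--         if i%2 == 0:
--             sum_oven += num
--         else:
--             sum_odd += num
--     return sum_oven if sum_oven >= sum_odd else sum_odd
-- ===== SOURCE B (Python) =====
-- def solution(num_list):
--     even = sum(num_list[::2])
--     odd = sum(num_list[1::2])
--     return max(even, odd)
-- ===== Notes on version B (the rewrite author's own statement) =====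
-- stated objective: idiomatic
-- what changed: Replaces the single indexed loop with a per-element parity branch by two strided slices num_list[::2] and num_list[1::2] summed separately, with max picking the winner.
import Mathlib
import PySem

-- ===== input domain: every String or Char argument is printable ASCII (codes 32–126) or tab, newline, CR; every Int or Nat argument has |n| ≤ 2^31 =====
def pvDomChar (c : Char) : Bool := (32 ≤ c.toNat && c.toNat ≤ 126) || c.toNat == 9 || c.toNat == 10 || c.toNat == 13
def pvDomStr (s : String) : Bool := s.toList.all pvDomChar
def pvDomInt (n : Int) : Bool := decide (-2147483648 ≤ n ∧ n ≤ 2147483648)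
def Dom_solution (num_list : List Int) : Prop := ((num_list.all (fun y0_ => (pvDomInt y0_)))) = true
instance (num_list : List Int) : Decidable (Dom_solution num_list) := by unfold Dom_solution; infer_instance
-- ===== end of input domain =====

-- B replaces A's indexed loop with parity branch by summing two strided slices (idiomatic decomposition; same cost).


-- ===== PORT A =====
-- state = (sum_odd, sum_oven), in the order Python initialises them
def solution (num_list : List Int) : Int :=
  let s := (PySem.List.enumerate num_list 0).foldl
    (fun (s : Int × Int) (x : Int × Int) =>
      if x.1 % 2 == 0 then (s.1, s.2 + x.2) else (s.1 + x.2, s.2)) (0, 0)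
  if s.2 ≥ s.1 then s.2 else s.1

-- ===== PORT B =====
-- hand port of the step-2 slice xs[::2] (exact: PySem.List.slice has no step)
def everyOther (l : List Int) : List Int :=
  match l with
  | [] => []
  | x :: xs => x :: everyOther (xs.drop 1)
termination_by l.length
decreasing_by simp

def solution_alt (num_list : List Int) : Int :=
  let even := (everyOther num_list).sum          -- sum(num_list[::2])
  let odd := (everyOther (num_list.drop 1)).sum  -- sum(num_list[1::2])
  max even odd

-- ===== PRECONDITION & SPEC =====
def Spec_solution (num_list : List Int) (out : Int) : Prop := out = solution_alt num_list
instance (num_list : List Int) (out : Int) : Decidable (Spec_solution num_list out) := by unfold Spec_solution; infer_instance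

-- ===== CLAIM (what is proved, stated in full; the proofs are below) =====
def Claim_equal_solution : Prop := ∀ (num_list : List Int), Dom_solution num_list → Spec_solution num_list (solution num_list)

-- ===== LEMMAS AND PROOFS =====
theorem everyOther_nil : everyOther [] = [] := by
  rw [everyOther.eq_def]

theorem everyOther_cons (x : Int) (xs : List Int) :
    everyOther (x :: xs) = x :: everyOther (xs.drop 1) := by
  rw [everyOther.eq_def]

theorem key (l : List Int) : ∀ (i a b : Int),
    (PySem.List.enumerate l i).foldl
      (fun (s : Int × Int) (x : Int × Int) =>
        if x.1 % 2 == 0 then (s.1, s.2 + x.2) else (s.1 + x.2, s.2)) (a, b) =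
    if i % 2 == 0 then (a + (everyOther (l.drop 1)).sum, b + (everyOther l).sum)
    else (a + (everyOther l).sum, b + (everyOther (l.drop 1)).sum) := by
  induction l with
  | nil =>
    intro i a b
    simp [PySem.List.enumerate_nil, everyOther_nil]
  | cons x xs ih =>
    intro i a b
    rw [PySem.List.enumerate_cons, List.foldl_cons]
    simp only [beq_iff_eq] at ih ⊢
    by_cases h : i % 2 = 0
    · rw [if_pos h, ih (i + 1), if_pos h, if_neg (by omega : ¬ (i + 1) % 2 = 0)]
      simp only [everyOther_cons, List.drop_one, List.sum_cons, List.tail_cons, Prod.mk.injEq]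
      exact ⟨by first | trivial | ring, by first | trivial | ring⟩
    · rw [if_neg h, ih (i + 1), if_neg h, if_pos (by omega : (i + 1) % 2 = 0)]
      simp only [everyOther_cons, List.drop_one, List.sum_cons, List.tail_cons, Prod.mk.injEq]
      exact ⟨by first | trivial | ring, by first | trivial | ring⟩

-- ===== VERDICT (by name: the statement is the Claim_ definition above) =====
theorem solution_spec : Claim_equal_solution := by
  intro l _
  unfold Spec_solution solution solution_alt
  simp only [key l 0 0 0]
  norm_num [max_def]
  split <;> split <;> omega
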